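-- pv_equiv track=rewrite | github.com/TendaMGit/nbms_project2 | src/nbms_app/views.py | _band_for_checks
-- ===== SOURCE A (Python) =====
-- def _band_for_checks(checks):
--     for check in checks:
--         if check.get("state") in {"blocked"}:
--             return "red"
--     for check in checks:
--         if check.get("state") in {"missing", "incomplete", "warning", "draft"}:
--             return "amber"
--     return "green"
-- ===== SOURCE B (Python) =====
-- def _band_for_checks(checks):
--     has_blocked = False
--     has_amber = False
--     for check in checks:
--         state = check.get("state")
--         if state == "blocked":
--             has_blocked = True
--         elif state in {"missing", "incomplete", "warning", "draft"}:
--             has_amber = True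
--     if has_blocked:
--         return "red"
--     if has_amber:
--         return "amber"
--     return "green"
-- ===== Notes on version B (the rewrite author's own statement) =====
-- stated objective: simpler
-- what changed: Replaces A's two sequential scans (early-return on blocked, then early-return on amber) with one pass that accumulates two booleans and decides the band after the loop.
import Mathlib
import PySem

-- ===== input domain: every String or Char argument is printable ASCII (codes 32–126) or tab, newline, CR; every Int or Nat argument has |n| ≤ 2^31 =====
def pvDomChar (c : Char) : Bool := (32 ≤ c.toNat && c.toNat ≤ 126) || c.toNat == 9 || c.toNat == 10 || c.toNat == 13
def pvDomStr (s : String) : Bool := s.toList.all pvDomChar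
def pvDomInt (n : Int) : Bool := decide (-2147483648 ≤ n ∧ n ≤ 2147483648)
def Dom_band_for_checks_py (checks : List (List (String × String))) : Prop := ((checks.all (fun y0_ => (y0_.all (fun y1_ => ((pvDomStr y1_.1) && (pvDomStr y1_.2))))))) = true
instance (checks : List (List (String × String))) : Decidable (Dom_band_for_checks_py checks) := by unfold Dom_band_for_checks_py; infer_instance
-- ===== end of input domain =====

-- B replaces A's two sequential early-return scans with one pass accumulating two booleans; simpler decomposition, same O(n) cost.


-- ===== PORT A =====
-- check.get("state")
def pvGetState (c : List (String × String)) : Option String := (PySem.Dict.mk c).get? "state"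

-- state in {"blocked"}
def pvIsBlocked (c : List (String × String)) : Bool := pvGetState c == some "blocked"

-- state in {"missing", "incomplete", "warning", "draft"}
def pvIsAmber (c : List (String × String)) : Bool :=
  (pvGetState c).any (fun s => ["missing", "incomplete", "warning", "draft"].contains s)

-- first loop: early return "red" on a blocked check
def pvLoop1 : List (List (String × String)) → Option String
  | [] => none
  | c :: rest => if pvIsBlocked c then some "red" else pvLoop1 rest

-- second loop: early return "amber" on an amber-state check
def pvLoop2 : List (List (String × String)) → Option String
  | [] => none
  | c :: rest => if pvIsAmber c then some "amber" else pvLoop2 rest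

def band_for_checks_py (checks : List (List (String × String))) : String :=
  match pvLoop1 checks with
  | some r => r
  | none =>
    match pvLoop2 checks with
    | some r => r
    | none => "green"

-- ===== PORT B =====
-- one pass accumulating (has_blocked, has_amber); decision deferred to after the loop
def pvStep (acc : Bool × Bool) (c : List (String × String)) : Bool × Bool :=
  let s := pvGetState c
  if s == some "blocked" then (true, acc.2)
  else if s.any (fun t => ["missing", "incomplete", "warning", "draft"].contains t) then (acc.1, true)
  else acc

def band_for_checks_py_alt (checks : List (List (String × String))) : String :=
  let p := checks.foldl pvStep (false, false)
  if p.1 then "red" else if p.2 then "amber" else "green"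

-- ===== PRECONDITION & SPEC =====
def Spec_band_for_checks_py (checks : List (List (String × String))) (out : String) : Prop := out = band_for_checks_py_alt checks
instance (checks : List (List (String × String))) (out : String) : Decidable (Spec_band_for_checks_py checks out) := by unfold Spec_band_for_checks_py; infer_instance

-- ===== CLAIM (what is proved, stated in full; the proofs are below) =====
def Claim_equal_band_for_checks_py : Prop := ∀ (checks : List (List (String × String))), Dom_band_for_checks_py checks → Spec_band_for_checks_py checks (band_for_checks_py checks)

-- ===== LEMMAS AND PROOFS =====
theorem pvLoop1_eq (checks : List (List (String × String))) :
    pvLoop1 checks = if checks.any pvIsBlocked then some "red" else none := by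
  induction checks with
  | nil => rfl
  | cons c rest ih => by_cases h : pvIsBlocked c <;> simp [pvLoop1, h, ih]

theorem pvLoop2_eq (checks : List (List (String × String))) :
    pvLoop2 checks = if checks.any pvIsAmber then some "amber" else none := by
  induction checks with
  | nil => rfl
  | cons c rest ih => by_cases h : pvIsAmber c <;> simp [pvLoop2, h, ih]

theorem pvBlocked_not_amber (c : List (String × String)) (h : pvIsBlocked c = true) :
    pvIsAmber c = false := by
  unfold pvIsBlocked at h
  unfold pvIsAmber
  cases hs : pvGetState c with
  | none => simp
  | some s =>
    rw [hs] at h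
    simp at h
    subst h
    decide

theorem pvFold_eq (checks : List (List (String × String))) (hb ha : Bool) :
    checks.foldl pvStep (hb, ha) = (hb || checks.any pvIsBlocked, ha || checks.any pvIsAmber) := by
  induction checks generalizing hb ha with
  | nil => simp
  | cons c rest ih =>
    simp only [List.foldl_cons, List.any_cons]
    by_cases h : pvIsBlocked c
    · have ha2 := pvBlocked_not_amber c h
      have : pvStep (hb, ha) c = (true, ha) := by
        unfold pvStep pvIsBlocked at *
        simp [h]
      rw [this, ih, h, ha2]
      simp
    · have hstep : pvStep (hb, ha) c = (hb, ha || pvIsAmber c) := by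
        unfold pvStep pvIsBlocked pvIsAmber at *
        by_cases h2 : (pvGetState c).any (fun t => ["missing", "incomplete", "warning", "draft"].contains t)
        · simp [h] at *
          simp [h2]
        · simp [h] at *
          simp [h2]
      rw [hstep, ih]
      simp [h, Bool.or_assoc]

theorem band_for_checks_py_spec : Claim_equal_band_for_checks_py := by
  intro checks _
  unfold Spec_band_for_checks_py band_for_checks_py band_for_checks_py_alt
  rw [pvLoop1_eq, pvLoop2_eq, pvFold_eq]
  by_cases h1 : checks.any pvIsBlocked <;> by_cases h2 : checks.any pvIsAmber <;> simp [h1, h2]
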